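-- pv_equiv track=rewrite | github.com/mfarhanz/Random-Scripts | CKYdet/CKYdet.py | check_single_rules
-- ===== SOURCE A (Python) =====
-- def check_single_rules(nonterm, ruleset):
--     ret = []
--     for key, rules in ruleset.items():
--         if (nonterm,) in rules:
--             temp = check_single_rules(key, ruleset)
--             if isinstance(temp,list):
--                 for nt in temp:
--                     ret.append(nt)
--         else:
--             if nonterm not in ret:
--                 ret.append(nonterm)
--     return ret
-- ===== SOURCE B (Python) =====
-- def check_single_rules(nonterm, ruleset):
--     # index: for each key, the set of symbols its unit (length-1) rules produce
--     singles = {key: {r[0] for r in rules if len(r) == 1} for key, rules in ruleset.items()}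
--     cache = {}
--
--     def go(nt):
--         if nt in cache:
--             return cache[nt]
--         ret = []
--         for key, single in singles.items():
--             if nt in single:
--                 ret.extend(go(key))
--             elif nt not in ret:
--                 ret.append(nt)
--         cache[nt] = ret
--         return ret
--
--     return go(nonterm)
-- ===== Notes on version B (the rewrite author's own statement) =====
-- stated objective: alternative
-- what changed: B replaces A's naive self-recursion by dynamic programming: a memoized recursion with a per-nonterminal cache (each nonterminal's list computed once and reused), plus a precomputed per-key set of unit-rule symbols replacing the inner tuple-membership scan.
import Mathlib
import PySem

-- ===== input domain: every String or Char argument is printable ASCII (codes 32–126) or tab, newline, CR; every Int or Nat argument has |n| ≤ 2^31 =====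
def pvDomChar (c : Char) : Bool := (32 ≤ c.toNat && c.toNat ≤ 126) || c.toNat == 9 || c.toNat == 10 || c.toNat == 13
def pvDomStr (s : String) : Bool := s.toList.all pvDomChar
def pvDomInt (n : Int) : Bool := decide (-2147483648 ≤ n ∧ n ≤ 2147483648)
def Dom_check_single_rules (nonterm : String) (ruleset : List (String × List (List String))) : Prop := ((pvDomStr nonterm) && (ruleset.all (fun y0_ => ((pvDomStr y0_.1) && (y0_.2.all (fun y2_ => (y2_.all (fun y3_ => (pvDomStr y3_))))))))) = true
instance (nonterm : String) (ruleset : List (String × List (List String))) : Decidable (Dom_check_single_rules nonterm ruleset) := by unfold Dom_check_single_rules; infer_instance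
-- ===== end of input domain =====

-- B re-implements A as a memoized (dynamic-programming) recursion: a per-nonterminal cache reuses each
-- computed list, and a precomputed unit-rule symbol set per key replaces the tuple-membership scan;
-- return values agree wherever A terminates (objective: alternative).

-- ===== PORT A =====
-- Python A recurses unboundedly (it raises RecursionError on a reachable unit-production cycle);
-- the port carries fuel ruleset.length + 1, which under Pre_ (acyclic reachable part) is never exhausted.
def pvCsrA : Nat → String → List (String × List (List String)) → List String
  | 0, _, _ => []            -- unreachable under Pre_check_single_rules
  | f + 1, nonterm, ruleset =>
    ruleset.foldl (fun ret p =>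
      if [nonterm] ∈ p.2 then
        -- temp = check_single_rules(key, ruleset); isinstance(temp, list) is always true
        ret ++ pvCsrA f p.1 ruleset
      else if nonterm ∈ ret then ret
      else ret ++ [nonterm]) []

def check_single_rules (nonterm : String) (ruleset : List (String × List (List String))) : List String :=
  pvCsrA (ruleset.length + 1) nonterm ruleset

-- ===== PORT B =====
-- {r[0] for r in rules if len(r) == 1}
def pvHeads (rules : List (List String)) : List String :=
  rules.filterMap (fun r => match r with | [x] => some x | _ => none)

-- singles = {key: {r[0] for r in rules if len(r) == 1} for key, rules in ruleset.items()};
-- the input dict has unique keys, so the comprehension maps each entry in order.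
def pvSingles (ruleset : List (String × List (List String))) : List (String × PySem.Set String) :=
  ruleset.map (fun p => (p.1, PySem.Set.ofList (pvHeads p.2)))

-- go(nt) with the memo cache threaded through; same fuel convention as port A.
def pvGoB : Nat → PySem.Dict String (List String) → String → List (String × PySem.Set String) →
    (List String × PySem.Dict String (List String))
  | 0, cache, _, _ => ([], cache)   -- unreachable under Pre_check_single_rules
  | f + 1, cache, nt, singles =>
    match cache.get? nt with
    | some v => (v, cache)
    | none =>
      let st := singles.foldl (fun (st : List String × PySem.Dict String (List String)) p =>
        if PySem.Set.contains p.2 nt then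
          let rc := pvGoB f st.2 p.1 singles
          (st.1 ++ rc.1, rc.2)
        else if nt ∈ st.1 then st
        else (st.1 ++ [nt], st.2)) ([], cache)
      (st.1, st.2.insert nt st.1)

def check_single_rules_alt (nonterm : String) (ruleset : List (String × List (List String))) : List String :=
  (pvGoB (ruleset.length + 1) PySem.Dict.empty nonterm (pvSingles ruleset)).1

-- ===== PRECONDITION & SPEC =====
-- keys k whose rules contain the unit production (a,) — the keys A recurses into from a
def pvSuccs (ruleset : List (String × List (List String))) (a : String) : List String :=
  ruleset.filterMap (fun p => if [a] ∈ p.2 then some p.1 else none)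

-- keys reachable from S by unit-production steps, saturated in m rounds
def pvReach (ruleset : List (String × List (List String))) : Nat → PySem.Set String → PySem.Set String
  | 0, S => S
  | m + 1, S => pvReach ruleset m (PySem.Set.update S (S.flatMap (pvSuccs ruleset)))

-- all keys A's recursion started at a can reach (≥ 1 step); ruleset.length rounds saturate
def pvR (ruleset : List (String × List (List String))) (a : String) : PySem.Set String :=
  pvReach ruleset ruleset.length (PySem.Set.ofList (pvSuccs ruleset a))

-- Pre_ excludes exactly the inputs where the unit-production graph has a cycle reachable from nonterm:
-- there Python A (and B alike) recurses forever and raises RecursionError.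
def Pre_check_single_rules (nonterm : String) (ruleset : List (String × List (List String))) : Prop :=
  ∀ k ∈ pvR ruleset nonterm, k ∉ pvR ruleset k
instance (nonterm : String) (ruleset : List (String × List (List String))) : Decidable (Pre_check_single_rules nonterm ruleset) := by
  unfold Pre_check_single_rules; infer_instance

def pvWitness_check_single_rules : String × (List (String × List (List String))) :=
  ("X", [("A", [["X"]]), ("B", [["A"], ["y", "z"]])])

def Spec_check_single_rules (nonterm : String) (ruleset : List (String × List (List String))) (out : List String) : Prop := out = check_single_rules_alt nonterm ruleset
instance (nonterm : String) (ruleset : List (String × List (List String))) (out : List String) : Decidable (Spec_check_single_rules nonterm ruleset out) := by unfold Spec_check_single_rules; infer_instance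

-- ===== CLAIM (what is proved, stated in full; the proofs are below) =====
def Claim_equal_check_single_rules : Prop := ∀ (nonterm : String) (ruleset : List (String × List (List String))), Dom_check_single_rules nonterm ruleset → Pre_check_single_rules nonterm ruleset → Spec_check_single_rules nonterm ruleset (check_single_rules nonterm ruleset)

-- ===== LEMMAS AND PROOFS =====

def pvKs (ruleset : List (String × List (List String))) : List String := ruleset.map Prod.fst

def pvClosed (ruleset : List (String × List (List String))) (T : List String) : Prop :=
  ∀ x ∈ T, ∀ y ∈ pvSuccs ruleset x, y ∈ T

def pvGood (ruleset : List (String × List (List String))) (a : String) : Prop :=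
  ∀ x ∈ pvR ruleset a, x ∉ pvR ruleset x

def pvInv (ruleset : List (String × List (List String))) (cache : PySem.Dict String (List String)) : Prop :=
  ∀ k v, cache.get? k = some v → v = pvCsrA (ruleset.length + 1) k ruleset

theorem pvSuccs_subset_ks (rs : List (String × List (List String))) (a : String) :
    ∀ x ∈ pvSuccs rs a, x ∈ pvKs rs := by
  intro x hx
  simp only [pvSuccs, List.mem_filterMap] at hx
  obtain ⟨p, hp, hfx⟩ := hx
  by_cases h : [a] ∈ p.2 <;> simp [h] at hfx
  subst hfx; exact List.mem_map_of_mem hp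

theorem pvChild_mem_succs (rs : List (String × List (List String))) (a : String)
    (p : String × List (List String)) (hp : p ∈ rs) (h : [a] ∈ p.2) : p.1 ∈ pvSuccs rs a := by
  simp only [pvSuccs, List.mem_filterMap]
  exact ⟨p, hp, by simp [h]⟩

theorem pvClosed_ks (rs : List (String × List (List String))) : pvClosed rs (pvKs rs) :=
  fun _ _ y hy => pvSuccs_subset_ks rs _ y hy

theorem pvReach_superset (rs : List (String × List (List String))) :
    ∀ (m : Nat) (S : PySem.Set String) (x : String), x ∈ S → x ∈ pvReach rs m S := by
  intro m
  induction m with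
  | zero => intro S x hx; simpa [pvReach] using hx
  | succ m ih =>
    intro S x hx
    simp only [pvReach]
    exact ih _ x ((PySem.Set.mem_update _ _ _).2 (Or.inl hx))

theorem pvReach_subset_closed (rs : List (String × List (List String))) :
    ∀ (m : Nat) (S T : List String), pvClosed rs T → (∀ x ∈ S, x ∈ T) →
      ∀ x ∈ pvReach rs m S, x ∈ T := by
  intro m
  induction m with
  | zero => intro S T _ hST x hx; exact hST x (by simpa [pvReach] using hx)
  | succ m ih =>
    intro S T hT hST x hx
    simp only [pvReach] at hx
    refine ih _ T hT ?_ x hx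
    intro y hy
    rcases (PySem.Set.mem_update _ _ _).1 hy with h | h
    · exact hST y h
    · rcases List.mem_flatMap.1 h with ⟨z, hz, hyz⟩
      exact hT z (hST z hz) y hyz

theorem pvReach_nodup (rs : List (String × List (List String))) :
    ∀ (m : Nat) (S : PySem.Set String), S.Nodup → (pvReach rs m S).Nodup := by
  intro m
  induction m with
  | zero => intro S h; simpa [pvReach] using h
  | succ m ih => intro S h; exact ih _ (PySem.Set.nodup_update _ _ h)

theorem pvStep_eq_of_closed (rs : List (String × List (List String))) (S : PySem.Set String)
    (hc : pvClosed rs S) : PySem.Set.update S (S.flatMap (pvSuccs rs)) = S := by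
  rw [PySem.Set.update_eq_append_filter]
  have : (PySem.Set.ofList (S.flatMap (pvSuccs rs))).filter (fun y => !(PySem.Set.contains S y)) = [] := by
    rw [List.filter_eq_nil_iff]
    intro y hy
    have hyS : y ∈ S := by
      rcases List.mem_flatMap.1 ((PySem.Set.mem_ofList _ _).1 hy) with ⟨x, hx, hyx⟩
      exact hc x hx y hyx
    simpa using hyS
  rw [this, List.append_nil]

theorem pvReach_eq_of_closed (rs : List (String × List (List String))) :
    ∀ (m : Nat) (S : PySem.Set String), pvClosed rs S → pvReach rs m S = S := by
  intro m
  induction m with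
  | zero => intro S _; rfl
  | succ m ih => intro S hc; simp only [pvReach]; rw [pvStep_eq_of_closed rs S hc]; exact ih S hc

theorem pvSaturate (rs : List (String × List (List String))) :
    ∀ (m : Nat) (S : PySem.Set String), S.Nodup → (∀ x ∈ S, x ∈ pvKs rs) →
      (pvKs rs).length ≤ m + S.length → pvClosed rs (pvReach rs m S) := by
  intro m
  induction m with
  | zero =>
    intro S hnd hsub hlen
    have hsp := List.Nodup.subperm hnd hsub
    have hperm := hsp.perm_of_length_le (by simpa using hlen)
    have hks : ∀ x ∈ pvKs rs, x ∈ S := fun x hx => hperm.symm.subset hx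
    intro x _ y hy
    simpa [pvReach] using hks y (pvSuccs_subset_ks rs x y hy)
  | succ m ih =>
    intro S hnd hsub hlen
    by_cases hc : pvClosed rs S
    · simp only [pvReach]
      rw [pvStep_eq_of_closed rs S hc, pvReach_eq_of_closed rs m S hc]
      exact hc
    · -- not closed: the update strictly grows
      have hc' : ∃ x ∈ S, ∃ y ∈ pvSuccs rs x, y ∉ S := by
        by_contra hno
        apply hc
        intro x hx y hy
        by_contra hyS
        exact hno ⟨x, hx, y, hy, hyS⟩
      obtain ⟨x, hx, y, hyx, hyS⟩ := hc'
      simp only [pvReach]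
      set S' := PySem.Set.update S (S.flatMap (pvSuccs rs)) with hS'
      have hnd' : S'.Nodup := PySem.Set.nodup_update _ _ hnd
      have hsub' : ∀ z ∈ S', z ∈ pvKs rs := by
        intro z hz
        rcases (PySem.Set.mem_update _ _ _).1 hz with h | h
        · exact hsub z h
        · rcases List.mem_flatMap.1 h with ⟨w, _, hzw⟩
          exact pvSuccs_subset_ks rs w z hzw
      have hlen' : S.length + 1 ≤ S'.length := by
        rw [hS', PySem.Set.update_eq_append_filter, List.length_append]
        have hymem : y ∈ (PySem.Set.ofList (S.flatMap (pvSuccs rs))).filter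
            (fun z => !(PySem.Set.contains S z)) := by
          rw [List.mem_filter]
          constructor
          · exact (PySem.Set.mem_ofList _ _).2 (List.mem_flatMap.2 ⟨x, hx, hyx⟩)
          · have : PySem.Set.contains S y = false := by
              by_contra h
              exact hyS ((PySem.Set.contains_iff _ _).1 (by simpa using h))
            simpa using hyS
        have := List.length_pos_of_mem hymem
        omega
      exact ih S' hnd' hsub' (by omega)

theorem pvR_nodup (rs : List (String × List (List String))) (a : String) : (pvR rs a).Nodup :=
  pvReach_nodup rs _ _ (PySem.Set.nodup_ofList _)

theorem pvR_subset_ks (rs : List (String × List (List String))) (a : String) :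
    ∀ x ∈ pvR rs a, x ∈ pvKs rs :=
  pvReach_subset_closed rs _ _ _ (pvClosed_ks rs)
    (fun x hx => pvSuccs_subset_ks rs a x ((PySem.Set.mem_ofList _ _).1 hx))

theorem pvR_length_le (rs : List (String × List (List String))) (a : String) :
    (pvR rs a).length ≤ rs.length := by
  have := (List.Nodup.subperm (pvR_nodup rs a) (pvR_subset_ks rs a)).length_le
  simpa [pvKs] using this

theorem pvR_closed (rs : List (String × List (List String))) (a : String) :
    pvClosed rs (pvR rs a) := by
  refine pvSaturate rs _ _ (PySem.Set.nodup_ofList _) ?_ ?_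
  · intro x hx; exact pvSuccs_subset_ks rs a x ((PySem.Set.mem_ofList _ _).1 hx)
  · simp [pvKs]

theorem pvSuccs_subset_pvR (rs : List (String × List (List String))) (a : String) :
    ∀ k ∈ pvSuccs rs a, k ∈ pvR rs a := by
  intro k hk
  exact pvReach_superset rs _ _ k ((PySem.Set.mem_ofList _ _).2 hk)

theorem pvR_trans (rs : List (String × List (List String))) (a k : String)
    (hk : k ∈ pvSuccs rs a) : ∀ x ∈ pvR rs k, x ∈ pvR rs a := by
  refine pvReach_subset_closed rs _ _ _ (pvR_closed rs a) ?_
  intro y hy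
  exact pvR_closed rs a k (pvSuccs_subset_pvR rs a k hk) y ((PySem.Set.mem_ofList _ _).1 hy)

theorem pvGood_child (rs : List (String × List (List String))) (a k : String)
    (hg : pvGood rs a) (hk : k ∈ pvSuccs rs a) : pvGood rs k := by
  intro x hx
  exact hg x (pvR_trans rs a k hk x hx)

theorem pvMu_child_lt (rs : List (String × List (List String))) (a k : String)
    (hg : pvGood rs a) (hk : k ∈ pvSuccs rs a) : (pvR rs k).length < (pvR rs a).length := by
  have hkR : k ∈ pvR rs a := pvSuccs_subset_pvR rs a k hk
  have hknot : k ∉ pvR rs k := hg k hkR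
  have hnd : (k :: pvR rs k).Nodup := List.nodup_cons.2 ⟨hknot, pvR_nodup rs k⟩
  have hsub : ∀ x ∈ (k :: pvR rs k), x ∈ pvR rs a := by
    intro x hx
    rcases List.mem_cons.1 hx with h | h
    · subst h; exact hkR
    · exact pvR_trans rs a k hk x h
  have := (List.Nodup.subperm hnd hsub).length_le
  simpa using this

-- fuel stability of port A: above the recursion depth the fuel does not matter
theorem pvCsrA_stable (rs : List (String × List (List String))) :
    ∀ (N : Nat) (a : String) (f1 f2 : Nat), pvGood rs a → (pvR rs a).length ≤ N →
      (pvR rs a).length < f1 → (pvR rs a).length < f2 →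
      pvCsrA f1 a rs = pvCsrA f2 a rs := by
  intro N
  induction N with
  | zero =>
    intro a f1 f2 hg hN h1 h2
    obtain ⟨g1, rfl⟩ : ∃ g, f1 = g + 1 := ⟨f1 - 1, by omega⟩
    obtain ⟨g2, rfl⟩ : ∃ g, f2 = g + 1 := ⟨f2 - 1, by omega⟩
    simp only [pvCsrA]
    refine PySem.List.foldl_congr_mem _ _ _ _ ?_
    intro acc p hp
    by_cases h : [a] ∈ p.2
    · exfalso
      have := pvSuccs_subset_pvR rs a p.1 (pvChild_mem_succs rs a p hp h)
      have := List.length_pos_of_mem this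
      omega
    · simp [h]
  | succ N ih =>
    intro a f1 f2 hg hN h1 h2
    obtain ⟨g1, rfl⟩ : ∃ g, f1 = g + 1 := ⟨f1 - 1, by omega⟩
    obtain ⟨g2, rfl⟩ : ∃ g, f2 = g + 1 := ⟨f2 - 1, by omega⟩
    simp only [pvCsrA]
    refine PySem.List.foldl_congr_mem _ _ _ _ ?_
    intro acc p hp
    by_cases h : [a] ∈ p.2
    · have hks := pvChild_mem_succs rs a p hp h
      have hlt := pvMu_child_lt rs a p.1 hg hks
      have := ih p.1 g1 g2 (pvGood_child rs a p.1 hg hks) (by omega) (by omega) (by omega)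
      simp [h, this]
    · simp [h]

theorem pvHeads_mem (rules : List (List String)) (a : String) :
    a ∈ pvHeads rules ↔ [a] ∈ rules := by
  simp only [pvHeads, List.mem_filterMap]
  constructor
  · rintro ⟨r, hr, hf⟩
    match r with
    | [] => simp at hf
    | [x] => simp at hf; subst hf; exact hr
    | x :: y :: t => simp at hf
  · intro h; exact ⟨[a], h, rfl⟩

theorem pvContains_singles (rules : List (List String)) (a : String) :
    PySem.Set.contains (PySem.Set.ofList (pvHeads rules)) a = true ↔ [a] ∈ rules := by
  rw [PySem.Set.contains_iff, PySem.Set.mem_ofList, pvHeads_mem]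

-- the memoized loop of B computes exactly A's loop at canonical fuel, preserving the cache invariant
theorem pvGoB_loop (rs : List (String × List (List String))) (a : String) (g : Nat)
    (hrec : ∀ k, k ∈ pvSuccs rs a → ∀ cache, pvInv rs cache →
      (pvGoB g cache k (pvSingles rs)).1 = pvCsrA (rs.length + 1) k rs ∧
      pvInv rs (pvGoB g cache k (pvSingles rs)).2)
    (hstab : ∀ k, k ∈ pvSuccs rs a → pvCsrA rs.length k rs = pvCsrA (rs.length + 1) k rs) :
    ∀ (l : List (String × List (List String))), (∀ p ∈ l, p ∈ rs) →
      ∀ (ret : List String) (cache : PySem.Dict String (List String)), pvInv rs cache →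
      ((l.map (fun p => (p.1, PySem.Set.ofList (pvHeads p.2)))).foldl
          (fun (st : List String × PySem.Dict String (List String)) p =>
            if PySem.Set.contains p.2 a then
              let rc := pvGoB g st.2 p.1 (pvSingles rs)
              (st.1 ++ rc.1, rc.2)
            else if a ∈ st.1 then st
            else (st.1 ++ [a], st.2)) (ret, cache)).1
        = l.foldl (fun ret p =>
            if [a] ∈ p.2 then ret ++ pvCsrA rs.length p.1 rs
            else if a ∈ ret then ret
            else ret ++ [a]) ret ∧
      pvInv rs ((l.map (fun p => (p.1, PySem.Set.ofList (pvHeads p.2)))).foldl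
          (fun (st : List String × PySem.Dict String (List String)) p =>
            if PySem.Set.contains p.2 a then
              let rc := pvGoB g st.2 p.1 (pvSingles rs)
              (st.1 ++ rc.1, rc.2)
            else if a ∈ st.1 then st
            else (st.1 ++ [a], st.2)) (ret, cache)).2 := by
  intro l
  induction l with
  | nil => intro _ ret cache hinv; exact ⟨rfl, hinv⟩
  | cons p l ih =>
    intro hl ret cache hinv
    have hp : p ∈ rs := hl p (List.mem_cons_self ..)
    have hl' : ∀ q ∈ l, q ∈ rs := fun q hq => hl q (List.mem_cons_of_mem _ hq)
    by_cases h : [a] ∈ p.2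
    · have hcont : PySem.Set.contains (PySem.Set.ofList (pvHeads p.2)) a = true :=
        (pvContains_singles p.2 a).2 h
      have hks : p.1 ∈ pvSuccs rs a := pvChild_mem_succs rs a p hp h
      have hr := hrec p.1 hks cache hinv
      simp only [List.map_cons, List.foldl_cons, hcont, if_pos h, if_true]
      rw [hr.1, ← hstab p.1 hks] at *
      exact ih hl' (ret ++ pvCsrA rs.length p.1 rs) _ hr.2
    · have hcont : PySem.Set.contains (PySem.Set.ofList (pvHeads p.2)) a = false := by
        by_contra hc
        exact h ((pvContains_singles p.2 a).1 (by simpa using hc))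
      simp only [List.map_cons, List.foldl_cons, hcont, if_neg h, Bool.false_eq_true, if_false]
      by_cases hm : a ∈ ret
      · simp only [if_pos hm]
        exact ih hl' ret cache hinv
      · simp only [if_neg hm]
        exact ih hl' (ret ++ [a]) cache hinv


theorem pvGoB_main (rs : List (String × List (List String))) (a : String) (f : Nat)
    (cache : PySem.Dict String (List String))
    (hg : pvGood rs a) (hf : (pvR rs a).length < f) (hinv : pvInv rs cache)
    (hchild : ∀ k, k ∈ pvSuccs rs a → ∀ (f' : Nat) (cache' : PySem.Dict String (List String)),
      (pvR rs k).length < f' → pvInv rs cache' →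
      (pvGoB f' cache' k (pvSingles rs)).1 = pvCsrA (rs.length + 1) k rs ∧
      pvInv rs (pvGoB f' cache' k (pvSingles rs)).2) :
    (pvGoB f cache a (pvSingles rs)).1 = pvCsrA (rs.length + 1) a rs ∧
    pvInv rs (pvGoB f cache a (pvSingles rs)).2 := by
  obtain ⟨g, rfl⟩ : ∃ g, f = g + 1 := ⟨f - 1, by omega⟩
  have hmu : (pvR rs a).length ≤ rs.length := pvR_length_le rs a
  cases hc : cache.get? a with
  | some v =>
    simp only [pvGoB, hc]
    exact ⟨hinv a v hc, hinv⟩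
  | none =>
    have hrec : ∀ k, k ∈ pvSuccs rs a → ∀ cache', pvInv rs cache' →
        (pvGoB g cache' k (pvSingles rs)).1 = pvCsrA (rs.length + 1) k rs ∧
        pvInv rs (pvGoB g cache' k (pvSingles rs)).2 := by
      intro k hk cache' hinv'
      have := pvMu_child_lt rs a k hg hk
      exact hchild k hk g cache' (by omega) hinv'
    have hstab : ∀ k, k ∈ pvSuccs rs a → pvCsrA rs.length k rs = pvCsrA (rs.length + 1) k rs := by
      intro k hk
      have hlt := pvMu_child_lt rs a k hg hk
      exact pvCsrA_stable rs (pvR rs k).length k rs.length (rs.length + 1)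
        (pvGood_child rs a k hg hk) le_rfl (by omega) (by omega)
    have hloop := pvGoB_loop rs a g hrec hstab rs (fun p hp => hp) [] cache hinv
    simp only [pvGoB, hc]
    refine ⟨?_, ?_⟩
    · show ((pvSingles rs).foldl _ ([], cache)).1 = _
      rw [show pvCsrA (rs.length + 1) a rs
            = rs.foldl (fun ret p =>
                if [a] ∈ p.2 then ret ++ pvCsrA rs.length p.1 rs
                else if a ∈ ret then ret
                else ret ++ [a]) [] from rfl]
      exact hloop.1
    · intro k v hkv
      by_cases hk : k = a
      · subst hk
        rw [PySem.Dict.get?_insert_self] at hkv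
        cases hkv
        rw [show pvCsrA (rs.length + 1) k rs
              = rs.foldl (fun ret p =>
                  if [k] ∈ p.2 then ret ++ pvCsrA rs.length p.1 rs
                  else if k ∈ ret then ret
                  else ret ++ [k]) [] from rfl]
        exact hloop.1
      · rw [PySem.Dict.get?_insert_of_ne _ _ hk] at hkv
        exact hloop.2 k v hkv

theorem pvGoB_correct (rs : List (String × List (List String))) :
    ∀ (N : Nat) (a : String) (f : Nat) (cache : PySem.Dict String (List String)),
      pvGood rs a → (pvR rs a).length ≤ N → (pvR rs a).length < f → pvInv rs cache →
      (pvGoB f cache a (pvSingles rs)).1 = pvCsrA (rs.length + 1) a rs ∧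
      pvInv rs (pvGoB f cache a (pvSingles rs)).2 := by
  intro N
  induction N with
  | zero =>
    intro a f cache hg hN hf hinv
    refine pvGoB_main rs a f cache hg hf hinv ?_
    intro k hk
    exfalso
    have := List.length_pos_of_mem (pvSuccs_subset_pvR rs a k hk)
    omega
  | succ N ih =>
    intro a f cache hg hN hf hinv
    refine pvGoB_main rs a f cache hg hf hinv ?_
    intro k hk
    have hlt := pvMu_child_lt rs a k hg hk
    have hgk := pvGood_child rs a k hg hk
    exact fun f' cache' hf' hinv' => ih k f' cache' hgk (by omega) hf' hinv'

-- ===== VERDICT (by name: the statement is the Claim_ definition above) =====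
theorem check_single_rules_spec : Claim_equal_check_single_rules := by
  intro nonterm rs _ hpre
  unfold Spec_check_single_rules check_single_rules check_single_rules_alt
  have hmu : (pvR rs nonterm).length ≤ rs.length := pvR_length_le rs nonterm
  have h := pvGoB_correct rs (pvR rs nonterm).length nonterm (rs.length + 1)
    PySem.Dict.empty hpre le_rfl (by omega) (by intro k v h; simp [PySem.Dict.get?_empty] at h)
  exact h.1.symm
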